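-- pv_equiv track=rewrite | github.com/PapenfussLab/MHC-clogs | lib/mhc/useful.py | remove_blank_fields
-- ===== SOURCE A (Python) =====
-- def remove_blank_fields(fields, limit):
--     """
--     Removes blank elements from a list of strings.  Limit refers to the number of non-blank elements in the new list; once this number is achieved, no more blank elements are removed.
--
--     @param fields: the list of strings to remove blank elements from
--     @param limit: the number of non-blank elements after which no more blank elements will be removed
--
--     @return: a new list with blank elements removed
--     """
--     new_fields = []
--     count = 0
--     for field in fields:
--         if len(new_fields)>=limit: break
--         count += 1
--         if len(field)==0: continue
--         new_fields.append(field)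
--     return new_fields + fields[count:]
-- ===== SOURCE B (Python) =====
-- def remove_blank_fields(fields, limit):
--     # Locate the boundary: index just past the limit-th non-blank element,
--     # then filter blanks out of the prefix and keep the suffix verbatim.
--     split = 0
--     if limit > 0:
--         split = len(fields)
--         count = 0
--         for i, f in enumerate(fields):
--             if len(f) != 0:
--                 count += 1
--                 if count == limit:
--                     split = i + 1
--                     break
--     return [f for f in fields[:split] if len(f) != 0] + fields[split:]
-- ===== Notes on version B (the rewrite author's own statement) =====
-- stated objective: alternative
-- what changed: Replaces A's single accumulate-and-break loop with a locate-the-boundary scan (index just past the limit-th non-blank) followed by a blank-filter over the prefix and verbatim suffix concatenation.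
import Mathlib
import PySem

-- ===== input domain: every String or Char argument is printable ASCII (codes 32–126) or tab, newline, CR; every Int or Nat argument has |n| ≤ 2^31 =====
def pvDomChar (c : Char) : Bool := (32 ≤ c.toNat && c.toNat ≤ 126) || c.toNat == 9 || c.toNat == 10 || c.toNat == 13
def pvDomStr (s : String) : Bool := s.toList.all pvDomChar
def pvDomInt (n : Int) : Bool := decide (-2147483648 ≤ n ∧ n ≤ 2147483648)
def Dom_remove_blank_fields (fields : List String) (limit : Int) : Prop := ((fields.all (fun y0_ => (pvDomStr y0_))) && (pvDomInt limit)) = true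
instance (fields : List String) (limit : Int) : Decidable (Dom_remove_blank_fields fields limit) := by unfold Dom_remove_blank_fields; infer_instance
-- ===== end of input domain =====

-- B replaces A's single accumulate-and-break loop by a locate-boundary scan plus a
-- prefix blank-filter and verbatim suffix (alternative decomposition, same cost).


-- ===== PORT A =====
-- A's for-loop with break/continue over (new_fields, count)
def pvALoop (fields : List String) (limit : Int) (new_fields : List String) (count : Int) :
    List String × Int :=
  match fields with
  | [] => (new_fields, count)
  | field :: rest =>
    if (new_fields.length : Int) ≥ limit then (new_fields, count)
    else
      if PySem.Str.len field = 0 then pvALoop rest limit new_fields (count + 1)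
      else pvALoop rest limit (new_fields ++ [field]) (count + 1)

def remove_blank_fields (fields : List String) (limit : Int) : List String :=
  let r := pvALoop fields limit [] 0
  r.1 ++ PySem.List.slice fields (some r.2) none

-- ===== PORT B =====
-- B's boundary-locating loop: index just past the limit-th non-blank, else n = len(fields)
def pvBLoop (fields : List String) (limit : Int) (count i n : Int) : Int :=
  match fields with
  | [] => n
  | f :: rest =>
    if PySem.Str.len f ≠ 0 then
      if count + 1 = limit then i + 1
      else pvBLoop rest limit (count + 1) (i + 1) n
    else pvBLoop rest limit count (i + 1) n

def remove_blank_fields_alt (fields : List String) (limit : Int) : List String :=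
  let split : Int := if limit > 0 then pvBLoop fields limit 0 0 (fields.length : Int) else 0
  (PySem.List.slice fields none (some split)).filter (fun f => PySem.Str.len f != 0)
    ++ PySem.List.slice fields (some split) none

-- ===== PRECONDITION & SPEC =====
def Spec_remove_blank_fields (fields : List String) (limit : Int) (out : List String) : Prop := out = remove_blank_fields_alt fields limit
instance (fields : List String) (limit : Int) (out : List String) : Decidable (Spec_remove_blank_fields fields limit out) := by unfold Spec_remove_blank_fields; infer_instance

-- ===== CLAIM (what is proved, stated in full; the proofs are below) =====
def Claim_equal_remove_blank_fields : Prop := ∀ (fields : List String) (limit : Int), Dom_remove_blank_fields fields limit → Spec_remove_blank_fields fields limit (remove_blank_fields fields limit)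

-- ===== LEMMAS AND PROOFS =====

-- common reference function: keep dropping blanks until k non-blanks kept
def specF : List String → Int → List String
  | [], _ => []
  | f :: rest, k =>
    if k ≤ 0 then f :: rest
    else if PySem.Str.len f = 0 then specF rest k
    else f :: specF rest (k - 1)

theorem specF_nonpos (fields : List String) (k : Int) (h : k ≤ 0) : specF fields k = fields := by
  cases fields with
  | nil => rfl
  | cons f rest => simp [specF, h]

theorem pvALoop_count_le (fields : List String) (limit : Int) (nf : List String) (count : Int) :
    count ≤ (pvALoop fields limit nf count).2 := by
  induction fields generalizing nf count with
  | nil => simp [pvALoop]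
  | cons f rest ih =>
    simp only [pvALoop]
    split_ifs with h1 h2
    · simp
    · exact le_trans (by omega) (ih nf (count + 1))
    · exact le_trans (by omega) (ih (nf ++ [f]) (count + 1))

theorem pvALoop_spec (fields : List String) (limit : Int) (nf : List String) (count : Int) :
    (pvALoop fields limit nf count).1
      ++ fields.drop ((pvALoop fields limit nf count).2 - count).toNat
    = nf ++ specF fields (limit - nf.length) := by
  induction fields generalizing nf count with
  | nil => simp [pvALoop, specF]
  | cons f rest ih =>
    simp only [pvALoop]
    split_ifs with h1 h2
    · have hk : limit - (nf.length : Int) ≤ 0 := by omega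
      simp [specF_nonpos _ _ hk]
    · have hc := pvALoop_count_le rest limit nf (count + 1)
      have hstep : ((pvALoop rest limit nf (count + 1)).2 - count).toNat
          = ((pvALoop rest limit nf (count + 1)).2 - (count + 1)).toNat + 1 := by omega
      rw [hstep, List.drop_succ_cons, ih nf (count + 1)]
      have hk : ¬ (limit - (nf.length : Int) ≤ 0) := by omega
      have h2' : f = "" := by simpa using h2
      simp [specF, hk, h2']
    · have hc := pvALoop_count_le rest limit (nf ++ [f]) (count + 1)
      have hstep : ((pvALoop rest limit (nf ++ [f]) (count + 1)).2 - count).toNat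
          = ((pvALoop rest limit (nf ++ [f]) (count + 1)).2 - (count + 1)).toNat + 1 := by omega
      rw [hstep, List.drop_succ_cons, ih (nf ++ [f]) (count + 1)]
      have hk : ¬ (limit - (nf.length : Int) ≤ 0) := by omega
      have harg : limit - (((nf ++ [f]).length : Nat) : Int) = limit - (nf.length : Int) - 1 := by
        simp; ring
      rw [harg]
      simp only [specF, if_neg hk, if_neg h2, List.append_assoc, List.cons_append,
        List.nil_append]

theorem A_eq_specF (fields : List String) (limit : Int) :
    remove_blank_fields fields limit = specF fields limit := by
  have h0 : (0 : Int) ≤ (pvALoop fields limit [] 0).2 := pvALoop_count_le fields limit [] 0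
  have := pvALoop_spec fields limit [] 0
  simp only [List.length_nil, Int.natCast_zero, sub_zero, List.nil_append] at this
  rw [remove_blank_fields, PySem.List.slice_from fields h0]
  exact this

theorem pvBLoop_lb (fields : List String) (limit : Int) (count i : Int) :
    i ≤ pvBLoop fields limit count i (i + fields.length) := by
  induction fields generalizing count i with
  | nil => simp [pvBLoop]
  | cons f rest ih =>
    simp only [pvBLoop]
    split_ifs with h1 h2
    · omega
    · have := ih (count + 1) (i + 1)
      have harg : i + ((f :: rest).length : Int) = (i + 1) + rest.length := by
        simp; ring
      rw [harg]; omega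
    · have := ih count (i + 1)
      have harg : i + ((f :: rest).length : Int) = (i + 1) + rest.length := by
        simp; ring
      rw [harg]; omega

theorem pvBLoop_spec (fields : List String) (limit : Int) (count i : Int)
    (h : count < limit) :
    (fields.take ((pvBLoop fields limit count i (i + fields.length)) - i).toNat).filter
        (fun f => PySem.Str.len f != 0)
      ++ fields.drop ((pvBLoop fields limit count i (i + fields.length)) - i).toNat
    = specF fields (limit - count) := by
  induction fields generalizing count i with
  | nil => simp [pvBLoop, specF]
  | cons f rest ih =>
    have harg : i + ((f :: rest).length : Int) = (i + 1) + rest.length := by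
      simp; ring
    simp only [pvBLoop, harg]
    split_ifs with h1 h2
    · -- found the limit-th non-blank at index i
      have h11 : ((i + 1) - i).toNat = 1 := by omega
      rw [h11]
      have hk : ¬ (limit - count ≤ 0) := by omega
      simp only [specF, if_neg hk, if_neg h1]
      rw [specF_nonpos _ _ (by omega : limit - count - 1 ≤ 0)]
      have h1' : ¬ f = "" := by simpa using h1
      simp [h1']
    · -- non-blank, keep scanning
      have hlb := pvBLoop_lb rest limit (count + 1) (i + 1)
      have hstep : ((pvBLoop rest limit (count + 1) (i + 1) ((i + 1) + rest.length)) - i).toNat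
          = ((pvBLoop rest limit (count + 1) (i + 1) ((i + 1) + rest.length)) - (i + 1)).toNat + 1 := by
        omega
      rw [hstep, List.take_succ_cons, List.drop_succ_cons]
      have hk : ¬ (limit - count ≤ 0) := by omega
      have hrec := ih (count + 1) (i + 1) (by omega)
      have h1b : (PySem.Str.len f != 0) = true := by simpa using h1
      simp only [List.filter_cons, h1b, if_pos, specF, if_neg hk, List.cons_append]
      rw [if_neg h1]
      have hcnt : limit - (count + 1) = limit - count - 1 := by ring
      rw [hcnt] at hrec
      exact congrArg (f :: ·) hrec
    · -- blank, skip
      have hlb := pvBLoop_lb rest limit count (i + 1)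
      have hstep : ((pvBLoop rest limit count (i + 1) ((i + 1) + rest.length)) - i).toNat
          = ((pvBLoop rest limit count (i + 1) ((i + 1) + rest.length)) - (i + 1)).toNat + 1 := by
        omega
      rw [hstep, List.take_succ_cons, List.drop_succ_cons]
      have hk : ¬ (limit - count ≤ 0) := by omega
      have hb0 : PySem.Str.len f = 0 := not_not.mp h1
      have hbb : (PySem.Str.len f != 0) = false := by simpa using hb0
      have hrec := ih count (i + 1) h
      simp only [List.filter_cons, hbb, Bool.false_eq_true, if_false, specF, if_neg hk,
        if_pos hb0]
      exact hrec

theorem B_eq_specF (fields : List String) (limit : Int) :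
    remove_blank_fields_alt fields limit = specF fields limit := by
  by_cases hl : limit > 0
  · have hlb : (0 : Int) ≤ pvBLoop fields limit 0 0 (fields.length : Int) := by
      have := pvBLoop_lb fields limit 0 0
      simpa using this
    have hmain := pvBLoop_spec fields limit 0 0 (by omega)
    simp only [zero_add, sub_zero] at hmain
    rw [remove_blank_fields_alt]
    simp only [if_pos hl]
    rw [PySem.List.slice_to fields hlb, PySem.List.slice_from fields hlb]
    exact hmain
  · rw [remove_blank_fields_alt]
    simp only [if_neg hl]
    rw [specF_nonpos _ _ (by omega)]
    rw [PySem.List.slice_to fields (by norm_num : (0:Int) ≤ 0),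
        PySem.List.slice_from fields (by norm_num : (0:Int) ≤ 0)]
    simp

-- ===== VERDICT (by name: the statement is the Claim_ definition above) =====
theorem remove_blank_fields_spec : Claim_equal_remove_blank_fields := by
  intro fields limit _
  unfold Spec_remove_blank_fields
  rw [A_eq_specF, B_eq_specF]
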